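-- pv_equiv track=rewrite | github.com/MLL-LabChartAgentVagen/chartAgentVAGEN | examples/scatter_generator.py | _filter_middle_indices
-- ===== SOURCE A (Python) =====
-- from typing import List, Dict
--
-- def _filter_middle_indices(numbers: List):
--     if not numbers:
--         return []
--
--     # Find the min and max values
--     min_val = min(numbers)
--     max_val = max(numbers)
--
--     # Find indices of min and max values
--     min_indices = {i for i, num in enumerate(numbers) if num == min_val}
--     max_indices = {i for i, num in enumerate(numbers) if num == max_val}
--
--     # Filter out indices that are neither min nor max
--     result = [i for i in range(len(numbers)) if i not in min_indices and i not in max_indices]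
--     return result
-- ===== SOURCE B (Python) =====
-- def _filter_middle_indices(numbers):
--     if not numbers:
--         return []
--     min_val = min(numbers)
--     max_val = max(numbers)
--     result = []
--     for i, num in enumerate(numbers):
--         if num != min_val and num != max_val:
--             result.append(i)
--     return result
-- ===== Notes on version B (the rewrite author's own statement) =====
-- stated objective: simpler
-- what changed: B drops A's two index-set tables and membership tests over range(len(numbers)): after computing min and max once it does a single enumerate pass appending i whenever the value differs from both extremes (no set construction, fewer passes).
import Mathlib
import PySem

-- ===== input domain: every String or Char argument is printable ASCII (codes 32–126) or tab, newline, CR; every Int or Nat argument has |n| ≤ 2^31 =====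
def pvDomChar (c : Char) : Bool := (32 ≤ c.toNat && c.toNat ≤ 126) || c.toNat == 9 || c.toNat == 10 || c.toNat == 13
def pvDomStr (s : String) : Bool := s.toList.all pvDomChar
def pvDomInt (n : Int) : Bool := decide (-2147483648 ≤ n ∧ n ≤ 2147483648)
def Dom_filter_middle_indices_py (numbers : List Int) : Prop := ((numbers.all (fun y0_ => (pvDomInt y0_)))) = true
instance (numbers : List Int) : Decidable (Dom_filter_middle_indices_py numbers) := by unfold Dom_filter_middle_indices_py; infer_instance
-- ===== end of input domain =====

-- B drops A's two index-set tables and the membership tests over range(len(numbers)):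
-- one enumerate pass compares each value with min/max directly (objective: simpler).

-- ===== PORT A =====
def filter_middle_indices_py (numbers : List Int) : List Int :=
  if numbers = [] then []
  else
    let min_val := (PySem.List.min? numbers (fun x => x)).getD 0
    let max_val := (PySem.List.max? numbers (fun x => x)).getD 0
    let min_indices : PySem.Set Int :=
      PySem.Set.ofList ((PySem.List.enumerate numbers).filterMap
        (fun p => if p.2 = min_val then some p.1 else none))
    let max_indices : PySem.Set Int :=
      PySem.Set.ofList ((PySem.List.enumerate numbers).filterMap
        (fun p => if p.2 = max_val then some p.1 else none))
    (PySem.List.pyRange 0 (numbers.length : Int) 1).filter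
      (fun i => !(PySem.Set.contains min_indices i) && !(PySem.Set.contains max_indices i))

-- ===== PORT B =====
def filter_middle_indices_py_alt (numbers : List Int) : List Int :=
  if numbers = [] then []
  else
    let min_val := (PySem.List.min? numbers (fun x => x)).getD 0
    let max_val := (PySem.List.max? numbers (fun x => x)).getD 0
    (PySem.List.enumerate numbers).foldl
      (fun result p => if p.2 != min_val && p.2 != max_val then result ++ [p.1] else result) []

-- ===== PRECONDITION & SPEC =====
def Spec_filter_middle_indices_py (numbers : List Int) (out : List Int) : Prop := out = filter_middle_indices_py_alt numbers
instance (numbers : List Int) (out : List Int) : Decidable (Spec_filter_middle_indices_py numbers out) := by unfold Spec_filter_middle_indices_py; infer_instance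

-- ===== CLAIM (what is proved, stated in full; the proofs are below) =====
def Claim_equal_filter_middle_indices_py : Prop := ∀ (numbers : List Int), Dom_filter_middle_indices_py numbers → Spec_filter_middle_indices_py numbers (filter_middle_indices_py numbers)

-- ===== LEMMAS AND PROOFS =====

-- A's index set contains i (for i a valid index) exactly when the value at i is v.
theorem contains_idx_set (numbers : List Int) (v i : Int)
    (h0 : 0 ≤ i) (h1 : i < (numbers.length : Int)) :
    PySem.Set.contains
      (PySem.Set.ofList ((PySem.List.enumerate numbers).filterMap
        (fun p => if p.2 = v then some p.1 else none))) i
      = decide (PySem.List.pyGetD numbers i 0 = v) := by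
  rw [Bool.eq_iff_iff]
  rw [PySem.Set.contains_iff, PySem.Set.mem_ofList, List.mem_filterMap]
  constructor
  · rintro ⟨p, hp, hf⟩
    rw [PySem.List.mem_enumerate_iff] at hp
    obtain ⟨k, hk, rfl⟩ := hp
    simp only [zero_add] at hf
    by_cases hv : numbers[k] = v
    · simp only [hv, if_pos trivial, Option.some.injEq] at hf
      subst hf
      rw [PySem.List.pyGetD_eq_getElem numbers 0 h0 h1]
      simp only [Int.toNat_natCast, decide_eq_true_eq]
      exact hv
    · simp [hv] at hf
  · intro hv
    rw [decide_eq_true_eq, PySem.List.pyGetD_eq_getElem numbers 0 h0 h1] at hv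
    refine ⟨(i, numbers[i.toNat]'(by omega)), ?_, ?_⟩
    · rw [PySem.List.mem_enumerate_iff]
      exact ⟨i.toNat, by omega, by simp [Int.toNat_of_nonneg h0]⟩
    · simp [hv]

-- B's fold is a filter of the index range, comparing values in place.
theorem alt_fold_eq_filter (numbers : List Int) (mv xv : Int) :
    (PySem.List.enumerate numbers).foldl
      (fun result p => if p.2 != mv && p.2 != xv then result ++ [p.1] else result) []
    = (PySem.List.pyRange 0 (numbers.length : Int) 1).filter
        (fun i => PySem.List.pyGetD numbers i 0 != mv && PySem.List.pyGetD numbers i 0 != xv) := by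
  rw [PySem.List.foldl_append_if (fun p : Int × Int => p.2 != mv && p.2 != xv) (fun p => p.1)]
  rw [PySem.List.enumerate_eq_map_pyRange numbers 0, List.filter_map, List.map_map]
  have : PySem.List.len numbers = (numbers.length : Int) := rfl
  rw [this]
  simp [Function.comp_def]

-- ===== VERDICT (by name: the statement is the Claim_ definition above) =====
theorem filter_middle_indices_py_spec : Claim_equal_filter_middle_indices_py := by
  intro numbers _
  unfold Spec_filter_middle_indices_py filter_middle_indices_py filter_middle_indices_py_alt
  by_cases hne : numbers = []
  · simp [hne]
  · simp only [if_neg hne]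
    rw [alt_fold_eq_filter]
    apply List.filter_congr
    intro i hi
    rw [PySem.List.mem_pyRange_one] at hi
    rw [contains_idx_set numbers _ i hi.1 hi.2, contains_idx_set numbers _ i hi.1 hi.2]
    rw [Bool.eq_iff_iff]
    simp
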